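-- pv_equiv track=rewrite | github.com/ibra303/Mutual-Exclusion | main.py | make_stable
-- ===== SOURCE A (Python) =====
-- def make_stable(processorsNum, processorsValues, haveToken, tokensNum, statesNum):
--     for i in range(processorsNum - 1, -1, -1):
--         if i == 0 and haveToken[i] == 1:
--             processorsValues[i] = (processorsValues[i] + 1) % statesNum
--         elif i != 0 and haveToken[i] == 1:
--             processorsValues[i] = processorsValues[i - 1]
--         # Update tokensNum if a token is consumed
--         if haveToken[i] == 1:
--             tokensNum -= 1
--     return processorsValues
-- ===== SOURCE B (Python) =====
-- def make_stable(processorsNum, processorsValues, haveToken, tokensNum, statesNum):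
--     # Snapshot the incoming values, then a single forward pass: each token holder
--     # reads its left neighbour's PRE-update value from the snapshot.
--     # Mutates and returns the same passed-in list, like the original.
--     orig = list(processorsValues)
--     for i in range(processorsNum):
--         if haveToken[i] == 1:
--             if i == 0:
--                 processorsValues[0] = (orig[0] + 1) % statesNum
--             else:
--                 processorsValues[i] = orig[i - 1]
--     return processorsValues
-- ===== Notes on version B (the rewrite author's own statement) =====
-- stated objective: alternative
-- what changed: Replaces the reverse-order in-place sweep (whose direction encodes the data dependency) with a forward pass over an explicit snapshot of the incoming values, and drops the dead tokensNum bookkeeping.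
import Mathlib
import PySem

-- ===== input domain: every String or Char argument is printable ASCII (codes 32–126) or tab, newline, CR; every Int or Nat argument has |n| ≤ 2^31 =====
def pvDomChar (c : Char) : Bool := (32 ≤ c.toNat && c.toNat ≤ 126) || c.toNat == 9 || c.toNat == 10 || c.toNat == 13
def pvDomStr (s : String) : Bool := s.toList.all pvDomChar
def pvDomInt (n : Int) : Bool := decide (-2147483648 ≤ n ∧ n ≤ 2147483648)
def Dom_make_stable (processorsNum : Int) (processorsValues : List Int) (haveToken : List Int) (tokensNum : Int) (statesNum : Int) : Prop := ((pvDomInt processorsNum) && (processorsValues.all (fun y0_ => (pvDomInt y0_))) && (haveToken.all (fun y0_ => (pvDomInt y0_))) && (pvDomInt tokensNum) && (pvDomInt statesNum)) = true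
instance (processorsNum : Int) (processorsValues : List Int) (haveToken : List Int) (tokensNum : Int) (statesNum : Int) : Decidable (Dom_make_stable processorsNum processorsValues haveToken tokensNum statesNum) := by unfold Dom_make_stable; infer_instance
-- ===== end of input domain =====

-- B replaces A's reverse in-place sweep by a forward pass over a snapshot of the incoming
-- values (same return value; both Pythons mutate the passed-in list identically in place).


-- ===== PORT A =====
def make_stable (processorsNum : Int) (processorsValues : List Int) (haveToken : List Int) (tokensNum : Int) (statesNum : Int) : List Int :=
  ((PySem.List.pyRange (processorsNum - 1) (-1) (-1)).foldl
    (fun (st : List Int × Int) i =>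
      let acc :=
        if i = 0 ∧ PySem.List.pyGetD haveToken i 0 = 1 then
          st.1.set i.toNat (PySem.Int.mod (PySem.List.pyGetD st.1 i 0 + 1) statesNum)
        else if ¬ i = 0 ∧ PySem.List.pyGetD haveToken i 0 = 1 then
          st.1.set i.toNat (PySem.List.pyGetD st.1 (i - 1) 0)
        else st.1
      let t := if PySem.List.pyGetD haveToken i 0 = 1 then st.2 - 1 else st.2
      (acc, t))
    (processorsValues, tokensNum)).1

-- ===== PORT B =====
def make_stable_alt (processorsNum : Int) (processorsValues : List Int) (haveToken : List Int) (tokensNum : Int) (statesNum : Int) : List Int :=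
  let orig := processorsValues
  (PySem.List.pyRange 0 processorsNum 1).foldl
    (fun acc i =>
      if PySem.List.pyGetD haveToken i 0 = 1 then
        if i = 0 then
          acc.set 0 (PySem.Int.mod (PySem.List.pyGetD orig 0 0 + 1) statesNum)
        else
          acc.set i.toNat (PySem.List.pyGetD orig (i - 1) 0)
      else acc)
    processorsValues

-- ===== PRECONDITION & SPEC =====
-- Pre_ excludes exactly the inputs where Python A raises: an index in range(processorsNum)
-- beyond haveToken (IndexError), a token held at an index beyond processorsValues
-- (IndexError), or a token at processor 0 with statesNum = 0 (ZeroDivisionError).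
def Pre_make_stable (processorsNum : Int) (processorsValues : List Int) (haveToken : List Int) (tokensNum : Int) (statesNum : Int) : Prop :=
  processorsNum ≤ (haveToken.length : Int) ∧
  (∀ i ∈ PySem.List.pyRange 0 processorsNum 1, PySem.List.pyGetD haveToken i 0 = 1 → i < (processorsValues.length : Int)) ∧
  ((0 < processorsNum ∧ PySem.List.pyGetD haveToken 0 0 = 1) → statesNum ≠ 0)
instance (processorsNum : Int) (processorsValues : List Int) (haveToken : List Int) (tokensNum : Int) (statesNum : Int) : Decidable (Pre_make_stable processorsNum processorsValues haveToken tokensNum statesNum) := by unfold Pre_make_stable; infer_instance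

def pvWitness_make_stable : Int × List Int × List Int × Int × Int := (3, [0, 1, 2], [1, 0, 1], 2, 3)

def Spec_make_stable (processorsNum : Int) (processorsValues : List Int) (haveToken : List Int) (tokensNum : Int) (statesNum : Int) (out : List Int) : Prop := out = make_stable_alt processorsNum processorsValues haveToken tokensNum statesNum
instance (processorsNum : Int) (processorsValues : List Int) (haveToken : List Int) (tokensNum : Int) (statesNum : Int) (out : List Int) : Decidable (Spec_make_stable processorsNum processorsValues haveToken tokensNum statesNum out) := by unfold Spec_make_stable; infer_instance

-- ===== CLAIM (what is proved, stated in full; the proofs are below) =====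
def Claim_equal_make_stable : Prop := ∀ (processorsNum : Int) (processorsValues : List Int) (haveToken : List Int) (tokensNum : Int) (statesNum : Int), Dom_make_stable processorsNum processorsValues haveToken tokensNum statesNum → Pre_make_stable processorsNum processorsValues haveToken tokensNum statesNum → Spec_make_stable processorsNum processorsValues haveToken tokensNum statesNum (make_stable processorsNum processorsValues haveToken tokensNum statesNum)

-- ===== LEMMAS AND PROOFS =====

-- The common "write at token indices, reading only the original list" step.
def pvStep (ht pv0 : List Int) (sN : Int) (acc : List Int) (i : Int) : List Int :=
  if PySem.List.pyGetD ht i 0 = 1 then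
    acc.set i.toNat (if i = 0 then PySem.Int.mod (PySem.List.pyGetD pv0 0 0 + 1) sN
                     else PySem.List.pyGetD pv0 (i - 1) 0)
  else acc

-- A's per-iteration update of the values list (first state component).
def aStep (ht : List Int) (sN : Int) (acc : List Int) (i : Int) : List Int :=
  if i = 0 ∧ PySem.List.pyGetD ht i 0 = 1 then
    acc.set i.toNat (PySem.Int.mod (PySem.List.pyGetD acc i 0 + 1) sN)
  else if ¬ i = 0 ∧ PySem.List.pyGetD ht i 0 = 1 then
    acc.set i.toNat (PySem.List.pyGetD acc (i - 1) 0)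
  else acc

lemma pyGet_nonneg {α : Type} (xs : List α) (k : Int) (h : 0 ≤ k) :
    PySem.List.pyGet? xs k = xs[k.toNat]? := by
  simp only [PySem.List.pyGet?, PySem.List.pyIdx?, if_pos h]
  split_ifs with h2
  · simp
  · exact (List.getElem?_eq_none (by omega)).symm

-- A's pair-state fold projects to the aStep fold on the values list.
lemma make_stable_eq_aFold (pN : Int) (pv ht : List Int) (tN sN : Int) :
    make_stable pN pv ht tN sN
      = (PySem.List.pyRange (pN - 1) (-1) (-1)).foldl (aStep ht sN) pv := by
  unfold make_stable
  generalize PySem.List.pyRange (pN - 1) (-1) (-1) = l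
  induction l generalizing pv tN with
  | nil => rfl
  | cons i l ih =>
    rw [List.foldl_cons, List.foldl_cons]
    exact ih _ _

-- With acc agreeing with pv0 at all positions ≤ any pending index, A's step reads = pv0 reads.
lemma aFold_eq_pvFold (ht pv0 : List Int) (sN : Int) (l : List Int) :
    l.Pairwise (· > ·) → (∀ i ∈ l, 0 ≤ i) →
    ∀ acc : List Int, (∀ j : Nat, (∃ i ∈ l, (j : Int) ≤ i) → acc[j]? = pv0[j]?) →
    l.foldl (aStep ht sN) acc = l.foldl (pvStep ht pv0 sN) acc := by
  induction l with
  | nil => intros; rfl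
  | cons i l ih =>
    intro hpw hnn acc hagree
    have hi0 : 0 ≤ i := hnn i (by simp)
    have hstep : aStep ht sN acc i = pvStep ht pv0 sN acc i := by
      have hrd : ∀ k : Int, 0 ≤ k → k ≤ i →
          PySem.List.pyGetD acc k 0 = PySem.List.pyGetD pv0 k 0 := by
        intro k hk0 hki
        have := hagree k.toNat ⟨i, by simp, by omega⟩
        simp [PySem.List.pyGetD, pyGet_nonneg _ k hk0, this]
      unfold aStep pvStep
      by_cases htok : PySem.List.pyGetD ht i 0 = 1
      · by_cases hi : i = 0
        · subst hi; simp [htok, hrd 0 le_rfl le_rfl]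
        · simp [htok, hi, hrd (i - 1) (by omega) (by omega)]
      · simp [htok]
    rw [List.foldl_cons, List.foldl_cons, hstep]
    apply ih hpw.of_cons (fun x hx => hnn x (List.mem_cons_of_mem _ hx))
    intro j hj
    obtain ⟨i', hi', hji'⟩ := hj
    have hlt : i' < i := (List.pairwise_cons.mp hpw).1 i' hi'
    have hacc := hagree j ⟨i', List.mem_cons_of_mem _ hi', hji'⟩
    unfold pvStep
    split_ifs with h h2
    · rw [List.getElem?_set_ne (by omega)]; exact hacc
    · rw [List.getElem?_set_ne (by omega)]; exact hacc
    · exact hacc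

def pvVal (pv0 : List Int) (sN : Int) (j : Nat) : Int :=
  if j = 0 then PySem.Int.mod (PySem.List.pyGetD pv0 0 0 + 1) sN
  else PySem.List.pyGetD pv0 ((j : Int) - 1) 0

lemma pvFold_getElem? (ht pv0 : List Int) (sN : Int) (l : List Int) (j : Nat) :
    (∀ i ∈ l, 0 ≤ i) →
    ∀ acc : List Int,
    (l.foldl (pvStep ht pv0 sN) acc)[j]? =
      if ((j : Int) ∈ l ∧ PySem.List.pyGetD ht (j : Int) 0 = 1)
      then (acc[j]?).map (fun _ => pvVal pv0 sN j) else acc[j]? := by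
  induction l with
  | nil => intro _ acc; simp
  | cons i l ih =>
    intro hnn acc
    rw [List.foldl_cons, ih (fun x hx => hnn x (List.mem_cons_of_mem _ hx))]
    by_cases hji : (j : Int) = i
    · subst hji
      by_cases htok : PySem.List.pyGetD ht (j : Int) 0 = 1
      · have hstep : pvStep ht pv0 sN acc (j : Int) = acc.set j (pvVal pv0 sN j) := by
          unfold pvStep pvVal
          rw [if_pos htok]
          simp only [Int.toNat_natCast]
          congr 1
          by_cases hj0 : j = 0
          · subst hj0; simp
          · rw [if_neg (by exact_mod_cast hj0), if_neg hj0]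
        have hset : (acc.set j (pvVal pv0 sN j))[j]? =
            (acc[j]?).map (fun _ => pvVal pv0 sN j) := by
          by_cases hlen : j < acc.length
          · rw [List.getElem?_set_self hlen, List.getElem?_eq_getElem hlen]
            rfl
          · have h1 : acc.length ≤ j := by omega
            rw [List.getElem?_eq_none (by simpa using h1), List.getElem?_eq_none h1]
            rfl
        rw [hstep]
        have hhead : ((j : Int) ∈ (j : Int) :: l ∧ PySem.List.pyGetD ht (j : Int) 0 = 1) := 
          ⟨List.mem_cons_self, htok⟩
        rw [if_pos hhead]
        by_cases hmem : (j : Int) ∈ l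
        · rw [if_pos ⟨hmem, htok⟩, hset]
          cases acc[j]? <;> rfl
        · rw [if_neg (by tauto), hset]
      · have hstep : pvStep ht pv0 sN acc (j : Int) = acc := by
          unfold pvStep; rw [if_neg htok]
        rw [hstep, if_neg (by tauto), if_neg (by tauto)]
    · have hstep : (pvStep ht pv0 sN acc i)[j]? = acc[j]? := by
        have hi0 : 0 ≤ i := hnn i List.mem_cons_self
        unfold pvStep
        split_ifs with h h2
        · exact List.getElem?_set_ne (by omega)
        · exact List.getElem?_set_ne (by omega)
        · rfl
      rw [hstep]
      have hmc : ((j : Int) ∈ i :: l) ↔ ((j : Int) ∈ l) := by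
        simp [List.mem_cons, hji]
      simp only [hmc]

lemma pvFold_perm (ht pv0 : List Int) (sN : Int) (l1 l2 : List Int) (acc : List Int)
    (hnn1 : ∀ i ∈ l1, 0 ≤ i) (hnn2 : ∀ i ∈ l2, 0 ≤ i)
    (hmem : ∀ x : Int, x ∈ l1 ↔ x ∈ l2) :
    l1.foldl (pvStep ht pv0 sN) acc = l2.foldl (pvStep ht pv0 sN) acc := by
  apply List.ext_getElem?
  intro j
  rw [pvFold_getElem? ht pv0 sN l1 j hnn1 acc, pvFold_getElem? ht pv0 sN l2 j hnn2 acc]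
  exact if_congr (and_congr_left' (hmem _)) rfl rfl

-- B's fold is the pvStep fold.
lemma bFold (ht pv0 : List Int) (sN : Int) (l : List Int) (acc : List Int) :
    l.foldl
      (fun acc i =>
        if PySem.List.pyGetD ht i 0 = 1 then
          if i = 0 then
            acc.set 0 (PySem.Int.mod (PySem.List.pyGetD pv0 0 0 + 1) sN)
          else
            acc.set i.toNat (PySem.List.pyGetD pv0 (i - 1) 0)
        else acc) acc
    = l.foldl (pvStep ht pv0 sN) acc := by
  induction l generalizing acc with
  | nil => rfl
  | cons i l ih =>
    rw [List.foldl_cons, List.foldl_cons, ih]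
    congr 1
    unfold pvStep
    by_cases h1 : PySem.List.pyGetD ht i 0 = 1 <;> by_cases h2 : i = 0 <;>
      simp [h1, h2]

-- ===== VERDICT (by name: the statement is the Claim_ definition above) =====
theorem make_stable_spec : Claim_equal_make_stable := by
  intro pN pv ht tN sN _ _
  unfold Spec_make_stable make_stable_alt
  rw [make_stable_eq_aFold, bFold]
  have hnnA : ∀ i ∈ PySem.List.pyRange (pN - 1) (-1) (-1), 0 ≤ i := by
    intro i hi
    have := PySem.List.mem_pyRange_neg_one.mp hi
    omega
  have hnnB : ∀ i ∈ PySem.List.pyRange 0 pN 1, 0 ≤ i := by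
    intro i hi
    exact (PySem.List.mem_pyRange_one.mp hi).1
  have hpw : (PySem.List.pyRange (pN - 1) (-1) (-1)).Pairwise (· > ·) := by
    rw [PySem.List.pyRange_neg_one_eq_reverse, List.pairwise_reverse]
    exact PySem.List.pairwise_lt_pyRange_one _ _
  rw [aFold_eq_pvFold ht pv sN _ hpw hnnA pv (fun _ _ => rfl)]
  apply pvFold_perm _ _ _ _ _ _ hnnA hnnB
  intro x
  rw [PySem.List.mem_pyRange_neg_one, PySem.List.mem_pyRange_one]
  omega
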